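-- pv_equiv track=rewrite | github.com/FurtherAI/motion_prediction | data_handling.py | filter_polylines
-- ===== SOURCE A (Python) =====
-- def filter_polylines(polylines):
--     polylines = [set(pl) for pl in polylines]
--     polylines.sort(key=lambda x : len(x))  # larger sets last, so don't need to check for subset against lower index
--     filtered_polylines = []
--     for idx, a in enumerate(polylines):
--         subset = False
--         for b in polylines[idx + 1:]:
--             if a.issubset(b) and a != b:
--                 subset = True
--                 break
--         if not subset:
--             filtered_polylines.append(a)
--     return filtered_polylines
-- ===== SOURCE B (Python) =====
-- def filter_polylines(polylines):
--     sets = sorted((set(pl) for pl in polylines), key=len)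
--     kept = []  # maximal sets of the suffix already swept
--     for a in reversed(sets):
--         if not any(a < m for m in kept):
--             kept.append(a)
--     return kept[::-1]
-- ===== Notes on version B (the rewrite author's own statement) =====
-- stated objective: alternative
-- what changed: Instead of testing every set against all later (larger) sets, B sweeps the length-sorted list from the largest down, keeping a list of maximal sets seen so far and dropping a set only if it is a proper subset of an already-kept maximal set.
import Mathlib
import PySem

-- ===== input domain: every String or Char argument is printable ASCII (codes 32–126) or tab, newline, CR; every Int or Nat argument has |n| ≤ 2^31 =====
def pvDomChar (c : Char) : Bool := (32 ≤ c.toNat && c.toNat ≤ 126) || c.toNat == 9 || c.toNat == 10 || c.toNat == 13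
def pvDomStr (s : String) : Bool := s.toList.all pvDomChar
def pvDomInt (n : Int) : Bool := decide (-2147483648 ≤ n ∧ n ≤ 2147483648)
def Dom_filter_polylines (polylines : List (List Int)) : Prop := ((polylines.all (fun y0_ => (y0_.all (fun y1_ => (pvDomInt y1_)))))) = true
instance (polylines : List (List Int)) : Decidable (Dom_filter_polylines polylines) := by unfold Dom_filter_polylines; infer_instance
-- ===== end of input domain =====

-- B replaces A's all-pairs later-element subset tests with a single sweep from the largest
-- set down that keeps only the maximal sets seen so far (alternative decomposition, same result).
-- Note: Python A returns a list of SETS; per the type convention each set is its List of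
-- distinct elements in first-occurrence order (set iteration order itself is not modelled).

-- ===== PORT A =====
-- inner 'for b in polylines[idx+1:]' loop with its break: true as soon as a ⊆ b and a ≠ b
def pvHasStrictSuperset (a : List Int) : List (List Int) → Bool
  | [] => false
  | b :: rest =>
    if PySem.Set.issubset a b && !(PySem.Set.equal a b) then true
    else pvHasStrictSuperset a rest

-- outer loop over the sorted sets; 'rest' is polylines[idx+1:]
def pvGoA : List (List Int) → List (List Int)
  | [] => []
  | a :: rest => if pvHasStrictSuperset a rest then pvGoA rest else a :: pvGoA rest

def filter_polylines (polylines : List (List Int)) : List (List Int) :=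
  pvGoA (PySem.List.sorted (polylines.map PySem.Set.ofList) (fun x => PySem.Set.len x) false)

-- ===== PORT B =====
-- one step of B's sweep: keep 'a' unless it is a proper subset (Python 'a < m') of a kept set
def pvStepB (kept : List (List Int)) (a : List Int) : List (List Int) :=
  if kept.any (fun m => PySem.Set.issubset a m && !(PySem.Set.equal a m)) then kept
  else kept ++ [a]

def filter_polylines_alt (polylines : List (List Int)) : List (List Int) :=
  let sets := PySem.List.sorted (polylines.map PySem.Set.ofList) (fun x => PySem.Set.len x) false
  ((sets.reverse.foldl pvStepB []).reverse)

-- ===== PRECONDITION & SPEC =====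
def Spec_filter_polylines (polylines : List (List Int)) (out : List (List Int)) : Prop := out = filter_polylines_alt polylines
instance (polylines : List (List Int)) (out : List (List Int)) : Decidable (Spec_filter_polylines polylines out) := by unfold Spec_filter_polylines; infer_instance

-- ===== CLAIM (what is proved, stated in full; the proofs are below) =====
def Claim_equal_filter_polylines : Prop := ∀ (polylines : List (List Int)), Dom_filter_polylines polylines → Spec_filter_polylines polylines (filter_polylines polylines)

-- ===== LEMMAS AND PROOFS =====

-- the proper-superset test both programs use
def pvP (a b : List Int) : Bool := PySem.Set.issubset a b && !(PySem.Set.equal a b)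

theorem pvP_def (a b : List Int) :
    (PySem.Set.issubset a b && !(PySem.Set.equal a b)) = pvP a b := rfl

theorem pvP_iff (a b : List Int) :
    pvP a b = true ↔ (∀ x ∈ a, x ∈ b) ∧ ¬(∀ x ∈ b, x ∈ a) := by
  simp [pvP, PySem.Set.issubset, PySem.Set.equal, List.all_eq_true]
  tauto

theorem pvP_trans {a b c : List Int} (h1 : pvP a b = true) (h2 : pvP b c = true) :
    pvP a c = true := by
  rw [pvP_iff] at *
  exact ⟨fun x hx => h2.1 x (h1.1 x hx), fun hca => h2.2 (fun x hx => h1.1 x (hca x hx))⟩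

theorem pvHasStrictSuperset_eq_any (a : List Int) (l : List (List Int)) :
    pvHasStrictSuperset a l = l.any (pvP a) := by
  induction l with
  | nil => rfl
  | cons b rest ih =>
    rw [List.any_cons, pvHasStrictSuperset, pvP_def]
    split_ifs with h
    · simp [h]
    · simp only [Bool.not_eq_true] at h
      simp [h, ih]

-- dropped elements always leave a kept proper superset behind
theorem pvGoA_any (a : List Int) (l : List (List Int)) :
    (pvGoA l).any (pvP a) = l.any (pvP a) := by
  induction l generalizing a with
  | nil => rfl
  | cons b rest ih =>
    rw [pvGoA]
    split_ifs with h
    · rw [ih]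
      simp only [List.any_cons]
      by_cases hab : pvP a b = true
      · rw [pvHasStrictSuperset_eq_any] at h
        simp only [List.any_eq_true] at h
        obtain ⟨c, hc, hbc⟩ := h
        have : rest.any (pvP a) = true := by
          simp only [List.any_eq_true]; exact ⟨c, hc, pvP_trans hab hbc⟩
        simp [this]
      · simp [hab]
    · simp only [List.any_cons, ih]

theorem pvFoldr_eq (l : List (List Int)) :
    l.foldr (fun a kept => pvStepB kept a) [] = (pvGoA l).reverse := by
  induction l with
  | nil => rfl
  | cons a rest ih =>
    rw [List.foldr_cons, ih, pvGoA, pvStepB]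
    simp only [pvP_def, List.any_reverse]
    rw [pvGoA_any, ← pvHasStrictSuperset_eq_any]
    split_ifs with h <;> simp

-- ===== VERDICT (by name: the statement is the Claim_ definition above) =====
theorem filter_polylines_spec : Claim_equal_filter_polylines := by
  intro polylines _
  show filter_polylines polylines = filter_polylines_alt polylines
  simp only [filter_polylines, filter_polylines_alt, List.foldl_reverse, pvFoldr_eq,
    List.reverse_reverse]
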